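-- pv_equiv track=rewrite | github.com/ajitnilakantan/puzzles | google-foobar/5-disorderly-escape.py | find_all_sums
-- ===== SOURCE A (Python) =====
-- def find_all_sums(amount, hand=None):
--     """
--     Find all sums J_i    where N_i = [1..n] inclusive    and Sum( J_i * N_i ) == n
--         E.g. if amount = 1   J = [[1]]  since 1 = 1*1
--              if amount = 2   J = [[2], [1, 1]] since 2 = 2*1
--              if amount = 3   J = [[3], [2, 1], [1, 1, 1]] since 3 = 2+1 = 3*1
--              if amount = 4   J = [[4], [3, 1], [2, 2], [2, 1, 1], [1, 1, 1, 1]] since 4 = 3+1 = 2+2 = 2*1+1 = 4*1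
--     Similar to the coin change problem
--     """
--     coins = [x+1 for x in range(0, amount)]
--     coins = [x for x in range(amount, 0, -1)]
--     hand = [] if hand is None else hand
--     if amount == 0:
--         yield hand
--     for coin in coins:
--         # ensures we don't give too much change, and combinations are unique
--         if coin > amount or (len(hand) > 0 and hand[-1] < coin):
--             continue
--         for result in find_all_sums(amount - coin, hand=hand + [coin]):
--             yield result
-- ===== SOURCE B (Python) =====
-- def find_all_sums(amount, hand=None):
--     """Enumerate the same partitions via the classic include/exclude-the-largest-part
--     recursion (binary coin-change decomposition) instead of looping over every coin."""
--     prefix = [] if hand is None else list(hand)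
--     cap = amount if not prefix else min(amount, prefix[-1])
--
--     def parts(n, c):
--         # partitions of n into parts <= c, largest-first reverse-lexicographic order
--         if n == 0:
--             return [[]]
--         if c <= 0 or n < 0:
--             return []
--         with_c = [[c] + p for p in parts(n - c, c)] if c <= n else []
--         return with_c + parts(n, c - 1)
--
--     for p in parts(amount, cap):
--         yield prefix + p
-- ===== Notes on version B (the rewrite author's own statement) =====
-- stated objective: alternative
-- what changed: Replaces A's generator that loops over every candidate coin and recurses per coin with the classic binary include/exclude-the-largest-part recursion for cap-bounded partitions, computing the cap once from hand and prefixing it at the end.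
import Mathlib
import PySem

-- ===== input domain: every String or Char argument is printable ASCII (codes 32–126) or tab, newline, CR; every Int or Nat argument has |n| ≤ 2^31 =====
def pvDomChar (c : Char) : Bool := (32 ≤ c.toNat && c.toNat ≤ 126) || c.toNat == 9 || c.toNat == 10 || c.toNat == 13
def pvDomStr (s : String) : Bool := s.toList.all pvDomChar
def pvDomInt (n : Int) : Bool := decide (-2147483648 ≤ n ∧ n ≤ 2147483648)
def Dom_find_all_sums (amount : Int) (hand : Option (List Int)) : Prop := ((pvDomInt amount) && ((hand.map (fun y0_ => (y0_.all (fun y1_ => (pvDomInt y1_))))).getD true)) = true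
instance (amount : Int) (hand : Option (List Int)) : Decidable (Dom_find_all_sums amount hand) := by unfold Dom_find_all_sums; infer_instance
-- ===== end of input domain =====

-- B replaces A's loop-over-every-coin recursion by the classic binary include/exclude-the-largest-part
-- recursion for bounded partitions (objective: alternative decomposition, same enumeration order).

-- ===== PORT A =====
-- A's generator, as the list of its yields.  The recursion is made total with fuel;
-- each recursive call strictly decreases `amount` by a coin ≥ 1, so fuel amount.toNat+1
-- (used by find_all_sums below) is never exhausted.
def fasGo : Nat → Int → List Int → List (List Int)
  | 0, _, _ => []
  | fuel + 1, amount, hand =>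
    -- coins = [x for x in range(amount, 0, -1)]  (the first binding of `coins` is dead code in A)
    let coins := PySem.List.pyRange amount 0 (-1)
    let init : List (List Int) := if amount = 0 then [hand] else []   -- `if amount == 0: yield hand`
    coins.foldl (fun acc coin =>
      -- hand[-1] is guarded by len(hand) > 0, so getLast?.getD 0 is exact here
      if coin > amount ∨ (0 < hand.length ∧ hand.getLast?.getD 0 < coin) then acc
      else acc ++ fasGo fuel (amount - coin) (hand ++ [coin])) init

def find_all_sums (amount : Int) (hand : Option (List Int)) : List (List Int) :=
  fasGo (amount.toNat + 1) amount (hand.getD [])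

-- ===== PORT B =====
-- partitions of n into parts ≤ c, largest-first reverse-lexicographic order
def fasParts (n c : Int) : List (List Int) :=
  if n = 0 then [[]]
  else if c ≤ 0 ∨ n < 0 then []
  else
    (if c ≤ n then (fasParts (n - c) c).map (fun p => c :: p) else []) ++ fasParts n (c - 1)
termination_by (n.toNat + c.toNat)
decreasing_by
  · omega
  · omega

def find_all_sums_alt (amount : Int) (hand : Option (List Int)) : List (List Int) :=
  let pfx := hand.getD []
  let cap := if pfx = [] then amount else min amount (pfx.getLast?.getD 0)
  (fasParts amount cap).map (fun p => pfx ++ p)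

-- ===== PRECONDITION & SPEC =====
def Spec_find_all_sums (amount : Int) (hand : Option (List Int)) (out : List (List Int)) : Prop := out = find_all_sums_alt amount hand
instance (amount : Int) (hand : Option (List Int)) (out : List (List Int)) : Decidable (Spec_find_all_sums amount hand out) := by unfold Spec_find_all_sums; infer_instance

-- ===== CLAIM (what is proved, stated in full; the proofs are below) =====
def Claim_equal_find_all_sums : Prop := ∀ (amount : Int) (hand : Option (List Int)), Dom_find_all_sums amount hand → Spec_find_all_sums amount hand (find_all_sums amount hand)

-- ===== LEMMAS AND PROOFS =====

-- the effective cap A's filter imposes on the next coin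
def fasCap (n : Int) (hand : List Int) : Int :=
  if hand = [] then n else min n (hand.getLast?.getD 0)

lemma foldl_skip {α β : Type} (p : α → Prop) [DecidablePred p] (g : α → List β) :
    ∀ (l : List α) (init : List β),
      List.foldl (fun acc x => if p x then acc else acc ++ g x) init l
        = init ++ l.flatMap (fun x => if p x then [] else g x) := by
  intro l
  induction l with
  | nil => simp
  | cons a l ih =>
    intro init
    by_cases h : p a <;> simp [h, ih, List.flatMap_cons]

lemma flatMap_congr_mem {α β : Type} {l : List α} {f g : α → List β}
    (h : ∀ x ∈ l, f x = g x) : l.flatMap f = l.flatMap g := by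
  induction l with
  | nil => simp
  | cons a l ih =>
    simp only [List.flatMap_cons]
    rw [h a (by simp), ih (fun x hx => h x (by simp [hx]))]

lemma fasParts_zero (c : Int) : fasParts 0 c = [[]] := by
  rw [fasParts]; simp

lemma fasParts_neg {n : Int} (c : Int) (hn : n < 0) : fasParts n c = [] := by
  rw [fasParts]
  have h1 : ¬ n = 0 := by omega
  simp [h1, hn]

lemma fasParts_step_gt {n c : Int} (h : n < c) : fasParts n c = fasParts n (c - 1) := by
  rcases lt_trichotomy n 0 with hn | hn | hn
  · rw [fasParts_neg c hn, fasParts_neg (c-1) hn]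
  · subst hn; rw [fasParts_zero, fasParts_zero]
  · rw [fasParts]
    have h1 : ¬ n = 0 := by omega
    have h2 : ¬ (c ≤ 0 ∨ n < 0) := by omega
    have h3 : ¬ c ≤ n := by omega
    simp [h1, h2, h3]

lemma fasParts_of_ge {n c : Int} (h : n ≤ c) : fasParts n c = fasParts n n := by
  have hk : ∀ (k : Nat) (c : Int), n ≤ c → (c - n).toNat = k → fasParts n c = fasParts n n := by
    intro k
    induction k with
    | zero => intro c h1 h2
              have : c = n := by omega
              rw [this]
    | succ k ih =>
      intro c h1 h2
      have hlt : n < c := by omega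
      rw [fasParts_step_gt hlt]
      exact ih (c - 1) (by omega) (by omega)
  exact hk (c - n).toNat c h rfl

lemma fasParts_min (n c : Int) : fasParts n (min n c) = fasParts n c := by
  rcases le_total c n with h | h
  · rw [min_eq_right h]
  · rw [min_eq_left h, fasParts_of_ge h]

-- split the descending coin list at a coin c with 1 ≤ c ≤ n
lemma pyRange_desc_split {n c : Int} (h1 : 1 ≤ c) (h2 : c ≤ n) :
    PySem.List.pyRange n 0 (-1)
      = PySem.List.pyRange n c (-1) ++ [c] ++ PySem.List.pyRange (c - 1) 0 (-1) := by
  rw [PySem.List.pyRange_neg_one_eq_reverse, PySem.List.pyRange_neg_one_eq_reverse,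
      PySem.List.pyRange_neg_one_eq_reverse]
  have e1 : (0 : Int) + 1 = 1 := by ring
  have e2 : c - 1 + 1 = c := by ring
  rw [e1, e2]
  rw [PySem.List.pyRange_one_append 1 c (n+1) h1 (by omega),
      PySem.List.pyRange_one_append c (c+1) (n+1) (by omega) (by omega),
      PySem.List.pyRange_one_singleton]
  simp [List.reverse_append]

-- A's filtered coin loop, expressed against B's recursion
lemma fasParts_flatMap {n : Int} (hn : 1 ≤ n) :
    ∀ (k : Nat) (c : Int), c ≤ n → c.toNat = k →
      fasParts n c = (PySem.List.pyRange n 0 (-1)).flatMap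
        (fun coin => if coin ≤ c then (fasParts (n - coin) coin).map (fun p => coin :: p) else []) := by
  intro k
  induction k with
  | zero =>
    intro c hc hk
    have hc0 : c ≤ 0 := by omega
    have hL : fasParts n c = [] := by
      rw [fasParts]
      have h1 : ¬ n = 0 := by omega
      simp [h1, hc0]
    rw [hL]
    have : ∀ coin ∈ PySem.List.pyRange n 0 (-1),
        (if coin ≤ c then (fasParts (n - coin) coin).map (fun p => coin :: p) else []) = ([] : List (List Int)) := by
      intro coin hcoin
      rw [PySem.List.mem_pyRange_neg_one] at hcoin
      have : ¬ coin ≤ c := by omega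
      simp [this]
    rw [flatMap_congr_mem this]
    simp
  | succ k ih =>
    intro c hc hk
    have hc1 : 1 ≤ c := by omega
    rw [pyRange_desc_split hc1 hc]
    rw [List.flatMap_append, List.flatMap_append, List.flatMap_cons, List.flatMap_nil]
    have hX : (PySem.List.pyRange n c (-1)).flatMap
        (fun coin => if coin ≤ c then (fasParts (n - coin) coin).map (fun p => coin :: p) else []) = [] := by
      have : ∀ coin ∈ PySem.List.pyRange n c (-1),
          (if coin ≤ c then (fasParts (n - coin) coin).map (fun p => coin :: p) else []) = ([] : List (List Int)) := by
        intro coin hcoin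
        rw [PySem.List.mem_pyRange_neg_one] at hcoin
        have : ¬ coin ≤ c := by omega
        simp [this]
      rw [flatMap_congr_mem this]; simp
    have hY : (PySem.List.pyRange (c-1) 0 (-1)).flatMap
          (fun coin => if coin ≤ c then (fasParts (n - coin) coin).map (fun p => coin :: p) else [])
        = (PySem.List.pyRange (c-1) 0 (-1)).flatMap
          (fun coin => if coin ≤ c - 1 then (fasParts (n - coin) coin).map (fun p => coin :: p) else []) := by
      apply flatMap_congr_mem
      intro coin hcoin
      rw [PySem.List.mem_pyRange_neg_one] at hcoin
      have h1 : coin ≤ c := by omega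
      have h2 : coin ≤ c - 1 := by omega
      simp [h1, h2]
    have hrec : fasParts n (c - 1) = (PySem.List.pyRange n 0 (-1)).flatMap
        (fun coin => if coin ≤ c - 1 then (fasParts (n - coin) coin).map (fun p => coin :: p) else []) := by
      exact ih (c - 1) (by omega) (by omega)
    have hX' : (PySem.List.pyRange n c (-1)).flatMap
        (fun coin => if coin ≤ c - 1 then (fasParts (n - coin) coin).map (fun p => coin :: p) else []) = [] := by
      have : ∀ coin ∈ PySem.List.pyRange n c (-1),
          (if coin ≤ c - 1 then (fasParts (n - coin) coin).map (fun p => coin :: p) else []) = ([] : List (List Int)) := by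
        intro coin hcoin
        rw [PySem.List.mem_pyRange_neg_one] at hcoin
        have : ¬ coin ≤ c - 1 := by omega
        simp [this]
      rw [flatMap_congr_mem this]; simp
    have hc' : (if c ≤ c then (fasParts (n - c) c).map (fun p => c :: p) else ([] : List (List Int)))
        = (fasParts (n - c) c).map (fun p => c :: p) := by simp
    have hcm1 : (if c ≤ c - 1 then (fasParts (n - c) c).map (fun p => c :: p) else ([] : List (List Int))) = [] := by
      have : ¬ c ≤ c - 1 := by omega
      simp [this]
    rw [hX, hY, hc']
    rw [fasParts]
    have h1 : ¬ n = 0 := by omega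
    have h2 : ¬ (c ≤ 0 ∨ n < 0) := by omega
    simp only [h1, if_false, h2, hc, if_true]
    rw [hrec, pyRange_desc_split hc1 hc]
    rw [List.flatMap_append, List.flatMap_append, List.flatMap_cons, List.flatMap_nil, hX', hcm1]
    simp

-- main invariant: A's fueled generator = B's recursion under the effective cap, prefixed by hand
lemma fasGo_eq : ∀ (fuel : Nat) (n : Int) (hand : List Int), n.toNat < fuel →
    fasGo fuel n hand = (fasParts n (fasCap n hand)).map (fun p => hand ++ p) := by
  intro fuel
  induction fuel with
  | zero => intro n hand h; omega
  | succ fuel ih =>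
    intro n hand hfuel
    show (PySem.List.pyRange n 0 (-1)).foldl
        (fun acc coin =>
          if coin > n ∨ (0 < hand.length ∧ hand.getLast?.getD 0 < coin) then acc
          else acc ++ fasGo fuel (n - coin) (hand ++ [coin]))
        (if n = 0 then [hand] else []) = _
    rw [foldl_skip]
    rcases lt_trichotomy n 0 with hn | hn | hn
    · rw [PySem.List.pyRange_neg_one_eq_nil (by omega)]
      have h1 : ¬ n = 0 := by omega
      simp [h1, fasParts_neg _ hn]
    · subst hn
      rw [PySem.List.pyRange_neg_one_eq_nil (by omega)]
      simp [fasParts_zero]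
    · -- n ≥ 1
      have h0 : ¬ n = 0 := by omega
      have hcapn : fasCap n hand ≤ n := by
        unfold fasCap; split <;> simp
      rw [fasParts_flatMap hn (fasCap n hand).toNat (fasCap n hand) hcapn rfl]
      rw [List.map_flatMap]
      simp only [h0, if_false, List.nil_append]
      apply flatMap_congr_mem
      intro coin hcoin
      rw [PySem.List.mem_pyRange_neg_one] at hcoin
      have hskip : (coin > n ∨ (0 < hand.length ∧ hand.getLast?.getD 0 < coin)) ↔ ¬ coin ≤ fasCap n hand := by
        unfold fasCap
        rcases eq_or_ne hand [] with he | he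
        · subst he; simp
        · have hlen : 0 < hand.length := List.length_pos_iff.mpr he
          simp [he, hlen]
          omega
      by_cases hs : coin ≤ fasCap n hand
      · have hns : ¬ (coin > n ∨ (0 < hand.length ∧ hand.getLast?.getD 0 < coin)) := by
          rw [hskip]; exact not_not_intro hs
        rw [if_neg hns, if_pos hs]
        have hfuel' : (n - coin).toNat < fuel := by omega
        rw [ih (n - coin) (hand ++ [coin]) hfuel']
        have hcap' : fasCap (n - coin) (hand ++ [coin]) = min (n - coin) coin := by
          unfold fasCap
          simp
        rw [hcap', fasParts_min]
        rw [List.map_map]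
        apply List.map_congr_left
        intro p _
        simp
      · have hys : (coin > n ∨ (0 < hand.length ∧ hand.getLast?.getD 0 < coin)) := by
          rw [hskip]; exact hs
        rw [if_pos hys, if_neg hs]
        simp

-- ===== VERDICT (by name: the statement is the Claim_ definition above) =====
theorem find_all_sums_spec : Claim_equal_find_all_sums := by
  intro amount hand _
  unfold Spec_find_all_sums find_all_sums find_all_sums_alt
  rw [fasGo_eq (amount.toNat + 1) amount (hand.getD []) (by omega)]
  rfl
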